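-- pv_equiv track=rewrite | github.com/nonshenz007/portfolio-fullstack-developer | VeriDoc/export/batch_analyzer.py | _analyze_compliance_breakdown
-- ===== SOURCE A (Python) =====
-- from typing import Dict, List, Optional, Any, Tuple
--
-- def _analyze_compliance_breakdown(batch_results: List[Dict[str, Any]]) -> Dict[str, int]:
--     """Analyze compliance score distribution."""
--     compliance_ranges = {
--         'excellent_90_100': 0,
--         'good_80_89': 0,
--         'acceptable_70_79': 0,
--         'poor_60_69': 0,
--         'failing_below_60': 0,
--         'processing_failed': 0
--     }
--
--     for result in batch_results:
--         if not result.get('success', False):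
--             compliance_ranges['processing_failed'] += 1
--             continue
--
--         compliance_score = result.get('overall_compliance', 0)
--
--         if compliance_score >= 90:
--             compliance_ranges['excellent_90_100'] += 1
--         elif compliance_score >= 80:
--             compliance_ranges['good_80_89'] += 1
--         elif compliance_score >= 70:
--             compliance_ranges['acceptable_70_79'] += 1
--         elif compliance_score >= 60:
--             compliance_ranges['poor_60_69'] += 1
--         else:
--             compliance_ranges['failing_below_60'] += 1
--
--     return compliance_ranges
-- ===== SOURCE B (Python) =====
-- def _analyze_compliance_breakdown(batch_results):
--     """Analyze compliance score distribution (sort + binary-search cut points)."""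
--     scores = sorted(r.get('overall_compliance', 0) for r in batch_results
--                     if r.get('success', False))
--
--     def first_at_least(t):
--         # index of the first score >= t in the sorted list (hand-written bisect_left)
--         lo, hi = 0, len(scores)
--         while lo < hi:
--             mid = (lo + hi) // 2
--             if scores[mid] < t:
--                 lo = mid + 1
--             else:
--                 hi = mid
--         return lo
--
--     n = len(scores)
--     c60, c70, c80, c90 = (first_at_least(60), first_at_least(70),
--                           first_at_least(80), first_at_least(90))
--     return {
--         'excellent_90_100': n - c90,
--         'good_80_89': c90 - c80,
--         'acceptable_70_79': c80 - c70,
--         'poor_60_69': c70 - c60,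
--         'failing_below_60': c60,
--         'processing_failed': len(batch_results) - n,
--     }
-- ===== Notes on version B (the rewrite author's own statement) =====
-- stated objective: alternative
-- what changed: Instead of a single pass with an if-elif cascade incrementing counters, B collects the successful scores, sorts them, finds the four cut indices (first score >= 60/70/80/90) by hand-written binary search, and reads each bucket count off as a difference of cut indices; correct because in a sorted list the scores of each bucket occupy a contiguous segment between consecutive cut points.
import Mathlib
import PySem

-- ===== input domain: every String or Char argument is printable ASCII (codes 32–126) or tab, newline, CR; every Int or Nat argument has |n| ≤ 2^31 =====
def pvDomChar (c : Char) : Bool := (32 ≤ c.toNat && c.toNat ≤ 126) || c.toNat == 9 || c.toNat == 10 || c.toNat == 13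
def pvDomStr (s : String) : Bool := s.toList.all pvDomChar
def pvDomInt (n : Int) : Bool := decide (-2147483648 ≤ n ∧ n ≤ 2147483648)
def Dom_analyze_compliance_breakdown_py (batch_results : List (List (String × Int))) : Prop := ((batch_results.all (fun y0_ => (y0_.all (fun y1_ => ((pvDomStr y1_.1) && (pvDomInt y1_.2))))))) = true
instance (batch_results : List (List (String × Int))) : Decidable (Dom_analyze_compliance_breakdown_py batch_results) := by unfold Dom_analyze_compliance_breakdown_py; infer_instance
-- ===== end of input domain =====

-- B replaces A's single counting pass with an if-elif cascade by a different algorithm: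
-- sort the successful scores, binary-search the four cut indices, and read the bucket
-- counts off as index differences (alternative, O(n log n) vs O(n)).

-- shared Python semantics: result.get(key, 0) on an association list (first match)
def pvGetInt (r : List (String × Int)) (k : String) : Int :=
  match r.find? (fun p => p.1 == k) with
  | some p => p.2
  | none => 0

-- ===== PORT A =====
def aStep (d : PySem.Dict String Int) (result : List (String × Int)) : PySem.Dict String Int :=
  if pvGetInt result "success" == 0 then d.modify "processing_failed" 0 (· + 1)
  else
    let s := pvGetInt result "overall_compliance"
    if s ≥ 90 then d.modify "excellent_90_100" 0 (· + 1)
    else if s ≥ 80 then d.modify "good_80_89" 0 (· + 1)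
    else if s ≥ 70 then d.modify "acceptable_70_79" 0 (· + 1)
    else if s ≥ 60 then d.modify "poor_60_69" 0 (· + 1)
    else d.modify "failing_below_60" 0 (· + 1)

def analyze_compliance_breakdown_py (batch_results : List (List (String × Int))) : List (String × Int) :=
  (batch_results.foldl aStep (PySem.Dict.ofList
    [("excellent_90_100", 0), ("good_80_89", 0), ("acceptable_70_79", 0),
     ("poor_60_69", 0), ("failing_below_60", 0), ("processing_failed", 0)])).items

-- ===== PORT B =====
-- truthiness of r.get('success', False) (values are ints; missing key -> 0 -> falsy)
def pvOk (r : List (String × Int)) : Bool := !(pvGetInt r "success" == 0)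
def pvScore (r : List (String × Int)) : Int := pvGetInt r "overall_compliance"

-- sorted(r.get('overall_compliance', 0) for r in batch_results if r.get('success', False))
def scoresOf (batch_results : List (List (String × Int))) : List Int :=
  PySem.List.sorted ((batch_results.filter pvOk).map pvScore) (fun x => x) false

-- hand-written binary search from Source B: first index in [lo, hi) with xs[i] >= t.
-- xs[mid] is always in range (lo < hi ≤ len), so getD is exact for Python's scores[mid].
def firstAtLeast (xs : List Int) (t : Int) (lo hi : Nat) : Nat :=
  if _h : lo < hi then
    if xs.getD ((lo + hi) / 2) 0 < t then firstAtLeast xs t ((lo + hi) / 2 + 1) hi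
    else firstAtLeast xs t lo ((lo + hi) / 2)
  else lo
termination_by hi - lo
decreasing_by all_goals omega

def analyze_compliance_breakdown_py_alt (batch_results : List (List (String × Int))) : List (String × Int) :=
  let scores := scoresOf batch_results
  let n := scores.length
  let c60 := firstAtLeast scores 60 0 n
  let c70 := firstAtLeast scores 70 0 n
  let c80 := firstAtLeast scores 80 0 n
  let c90 := firstAtLeast scores 90 0 n
  [("excellent_90_100", (n : Int) - (c90 : Int)),
   ("good_80_89", (c90 : Int) - (c80 : Int)),
   ("acceptable_70_79", (c80 : Int) - (c70 : Int)),
   ("poor_60_69", (c70 : Int) - (c60 : Int)),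
   ("failing_below_60", (c60 : Int)),
   ("processing_failed", (batch_results.length : Int) - (n : Int))]

-- ===== PRECONDITION & SPEC =====
def Spec_analyze_compliance_breakdown_py (batch_results : List (List (String × Int))) (out : List (String × Int)) : Prop := out = analyze_compliance_breakdown_py_alt batch_results
instance (batch_results : List (List (String × Int))) (out : List (String × Int)) : Decidable (Spec_analyze_compliance_breakdown_py batch_results out) := by unfold Spec_analyze_compliance_breakdown_py; infer_instance

-- ===== CLAIM =====
def Claim_equal_analyze_compliance_breakdown_py : Prop := ∀ (batch_results : List (List (String × Int))), Dom_analyze_compliance_breakdown_py batch_results → Spec_analyze_compliance_breakdown_py batch_results (analyze_compliance_breakdown_py batch_results)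

-- ===== LEMMAS AND PROOFS =====

-- if a list has a boundary index k (all p below k, all ¬p from k on), countP p = k
theorem countP_of_boundary (p : Int → Bool) : ∀ (xs : List Int) (k : Nat), k ≤ xs.length →
    (∀ (j : Nat) (hj : j < xs.length), j < k → p xs[j] = true) →
    (∀ (j : Nat) (hj : j < xs.length), k ≤ j → p xs[j] = false) →
    xs.countP p = k := by
  intro xs
  induction xs with
  | nil => intro k hk _ _; simp at hk ⊢; omega
  | cons x t ih =>
    intro k hk hlow hhigh
    cases k with
    | zero =>
      have hx : p x = false := hhigh 0 (by simp) (by omega)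
      have := ih 0 (by omega)
        (by intro j hj hjk; omega)
        (by intro j hj _; exact hhigh (j+1) (by simpa using Nat.succ_lt_succ hj) (by omega))
      simp [hx, this]
    | succ k' =>
      have hx : p x = true := hlow 0 (by simp) (by omega)
      have := ih k' (by simpa using hk)
        (by intro j hj hjk; exact hlow (j+1) (by simpa using Nat.succ_lt_succ hj) (by omega))
        (by intro j hj hjk; exact hhigh (j+1) (by simpa using Nat.succ_lt_succ hj) (by omega))
      simp [hx, this]


-- the binary search computes the boundary = count of elements < t, on a sorted list
theorem firstAtLeast_eq (xs : List Int) (t : Int) (hsort : xs.Pairwise (· ≤ ·)) :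
    ∀ (d lo hi : Nat), hi - lo ≤ d → lo ≤ hi → hi ≤ xs.length →
    (∀ (j : Nat) (hj : j < xs.length), j < lo → xs[j] < t) →
    (∀ (j : Nat) (hj : j < xs.length), hi ≤ j → ¬ xs[j] < t) →
    firstAtLeast xs t lo hi = xs.countP (fun s => decide (s < t)) := by
  have hpw := List.pairwise_iff_getElem.mp hsort
  intro d
  induction d with
  | zero =>
    intro lo hi hd hle hlen hlow hhigh
    have heq : lo = hi := by omega
    rw [firstAtLeast, dif_neg (by omega)]
    refine (countP_of_boundary _ xs lo (by omega) ?_ ?_).symm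
    · intro j hj hjk; simpa using hlow j hj hjk
    · intro j hj hjk; simpa using hhigh j hj (by omega)
  | succ d ih =>
    intro lo hi hd hle hlen hlow hhigh
    by_cases hlt : lo < hi
    · have hmlt : (lo + hi) / 2 < xs.length := by omega
      rw [firstAtLeast, dif_pos hlt, List.getD_eq_getElem xs 0 hmlt]
      by_cases hx : xs[(lo + hi) / 2] < t
      · rw [if_pos hx]
        refine ih ((lo + hi) / 2 + 1) hi (by omega) (by omega) hlen ?_ hhigh
        intro j hj hjk
        rcases Nat.lt_or_ge j ((lo + hi) / 2) with h | h
        · exact lt_of_le_of_lt (hpw j ((lo + hi) / 2) hj hmlt h) hx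
        · have : j = (lo + hi) / 2 := by omega
          subst this; exact hx
      · rw [if_neg hx]
        refine ih lo ((lo + hi) / 2) (by omega) (by omega) (by omega) hlow ?_
        intro j hj hjk
        rcases Nat.lt_or_ge ((lo + hi) / 2) j with h | h
        · have := hpw ((lo + hi) / 2) j hmlt hj h
          omega
        · have : j = (lo + hi) / 2 := by omega
          subst this; exact hx
    · have heq : lo = hi := by omega
      rw [firstAtLeast, dif_neg hlt]
      refine (countP_of_boundary _ xs lo (by omega) ?_ ?_).symm
      · intro j hj hjk; simpa using hlow j hj hjk
      · intro j hj hjk; simpa using hhigh j hj (by omega)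


-- split a count by a subsumed predicate
theorem countP_subsume {α : Type} (p q : α → Bool) (h : ∀ a, q a = true → p a = true) :
    ∀ (l : List α), l.countP p = l.countP q + l.countP (fun a => p a && !q a) := by
  intro l
  induction l with
  | nil => simp
  | cons x t ih =>
    have hx := h x
    cases hp : p x <;> cases hq : q x <;> simp_all <;> omega


-- A's fold, with arbitrary starting counters, rendered as counts of the input list
theorem foldA (l : List (List (String × Int))) (e g a p f pf : Int) :
    (l.foldl aStep (PySem.Dict.mk
      [("excellent_90_100", e), ("good_80_89", g), ("acceptable_70_79", a),
       ("poor_60_69", p), ("failing_below_60", f), ("processing_failed", pf)])).items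
    = [("excellent_90_100", e + (l.countP (fun r => pvOk r && !(decide (pvScore r < 90))) : Int)),
       ("good_80_89", g + (l.countP (fun r => pvOk r && decide (pvScore r < 90) && !(decide (pvScore r < 80))) : Int)),
       ("acceptable_70_79", a + (l.countP (fun r => pvOk r && decide (pvScore r < 80) && !(decide (pvScore r < 70))) : Int)),
       ("poor_60_69", p + (l.countP (fun r => pvOk r && decide (pvScore r < 70) && !(decide (pvScore r < 60))) : Int)),
       ("failing_below_60", f + (l.countP (fun r => pvOk r && decide (pvScore r < 60)) : Int)),
       ("processing_failed", pf + (l.countP (fun r => !(pvOk r)) : Int))] := by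
  induction l generalizing e g a p f pf with
  | nil => simp
  | cons r t ih =>
    simp only [List.foldl_cons]
    by_cases hs : pvGetInt r "success" = 0
    · have hA : aStep (PySem.Dict.mk
          [("excellent_90_100", e), ("good_80_89", g), ("acceptable_70_79", a), ("poor_60_69", p), ("failing_below_60", f), ("processing_failed", pf)]) r
          = PySem.Dict.mk
          [("excellent_90_100", e), ("good_80_89", g), ("acceptable_70_79", a), ("poor_60_69", p), ("failing_below_60", f), ("processing_failed", pf + 1)] := by
        simp [aStep, hs, PySem.Dict.modify, PySem.Dict.insert, PySem.Dict.getD, PySem.Dict.get?, PySem.Dict.contains]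
      have hOk : pvOk r = false := by simp [pvOk, hs]
      rw [hA, ih]
      simp [List.countP_cons, hOk]
      omega
    · have hA1 : (pvGetInt r "success" == 0) = false := by simp [hs]
      have hOk : pvOk r = true := by simp [pvOk, hs]
      by_cases h90 : (90:Int) ≤ pvGetInt r "overall_compliance"
      · have hA : aStep (PySem.Dict.mk
            [("excellent_90_100", e), ("good_80_89", g), ("acceptable_70_79", a), ("poor_60_69", p), ("failing_below_60", f), ("processing_failed", pf)]) r
            = PySem.Dict.mk
            [("excellent_90_100", e + 1), ("good_80_89", g), ("acceptable_70_79", a), ("poor_60_69", p), ("failing_below_60", f), ("processing_failed", pf)] := by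
          simp [aStep, hA1, PySem.Dict.modify, PySem.Dict.insert, PySem.Dict.getD, PySem.Dict.get?, PySem.Dict.contains,
                show (60:Int) ≤ pvGetInt r "overall_compliance" by omega,
                show (70:Int) ≤ pvGetInt r "overall_compliance" by omega,
                show (80:Int) ≤ pvGetInt r "overall_compliance" by omega,
                show (90:Int) ≤ pvGetInt r "overall_compliance" by omega]
        have hd60 : decide (pvScore r < 60) = false := by simp [pvScore]; omega
        have hd70 : decide (pvScore r < 70) = false := by simp [pvScore]; omega
        have hd80 : decide (pvScore r < 80) = false := by simp [pvScore]; omega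
        have hd90 : decide (pvScore r < 90) = false := by simp [pvScore]; omega
        rw [hA, ih]
        simp [List.countP_cons, hOk, hd60, hd70, hd80, hd90]
        omega
      · by_cases h80 : (80:Int) ≤ pvGetInt r "overall_compliance"
        · have hA : aStep (PySem.Dict.mk
              [("excellent_90_100", e), ("good_80_89", g), ("acceptable_70_79", a), ("poor_60_69", p), ("failing_below_60", f), ("processing_failed", pf)]) r
              = PySem.Dict.mk
              [("excellent_90_100", e), ("good_80_89", g + 1), ("acceptable_70_79", a), ("poor_60_69", p), ("failing_below_60", f), ("processing_failed", pf)] := by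
            simp [aStep, hA1, PySem.Dict.modify, PySem.Dict.insert, PySem.Dict.getD, PySem.Dict.get?, PySem.Dict.contains,
                  show (60:Int) ≤ pvGetInt r "overall_compliance" by omega,
                  show (70:Int) ≤ pvGetInt r "overall_compliance" by omega,
                  show (80:Int) ≤ pvGetInt r "overall_compliance" by omega,
                  show ¬ (90:Int) ≤ pvGetInt r "overall_compliance" by omega]
          have hd60 : decide (pvScore r < 60) = false := by simp [pvScore]; omega
          have hd70 : decide (pvScore r < 70) = false := by simp [pvScore]; omega
          have hd80 : decide (pvScore r < 80) = false := by simp [pvScore]; omega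
          have hd90 : decide (pvScore r < 90) = true := by simp [pvScore]; omega
          rw [hA, ih]
          simp [List.countP_cons, hOk, hd60, hd70, hd80, hd90]
          omega
        · by_cases h70 : (70:Int) ≤ pvGetInt r "overall_compliance"
          · have hA : aStep (PySem.Dict.mk
                [("excellent_90_100", e), ("good_80_89", g), ("acceptable_70_79", a), ("poor_60_69", p), ("failing_below_60", f), ("processing_failed", pf)]) r
                = PySem.Dict.mk
                [("excellent_90_100", e), ("good_80_89", g), ("acceptable_70_79", a + 1), ("poor_60_69", p), ("failing_below_60", f), ("processing_failed", pf)] := by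
              simp [aStep, hA1, PySem.Dict.modify, PySem.Dict.insert, PySem.Dict.getD, PySem.Dict.get?, PySem.Dict.contains,
                    show (60:Int) ≤ pvGetInt r "overall_compliance" by omega,
                    show (70:Int) ≤ pvGetInt r "overall_compliance" by omega,
                    show ¬ (80:Int) ≤ pvGetInt r "overall_compliance" by omega,
                    show ¬ (90:Int) ≤ pvGetInt r "overall_compliance" by omega]
            have hd60 : decide (pvScore r < 60) = false := by simp [pvScore]; omega
            have hd70 : decide (pvScore r < 70) = false := by simp [pvScore]; omega
            have hd80 : decide (pvScore r < 80) = true := by simp [pvScore]; omega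
            have hd90 : decide (pvScore r < 90) = true := by simp [pvScore]; omega
            rw [hA, ih]
            simp [List.countP_cons, hOk, hd60, hd70, hd80, hd90]
            omega
          · by_cases h60 : (60:Int) ≤ pvGetInt r "overall_compliance"
            · have hA : aStep (PySem.Dict.mk
                  [("excellent_90_100", e), ("good_80_89", g), ("acceptable_70_79", a), ("poor_60_69", p), ("failing_below_60", f), ("processing_failed", pf)]) r
                  = PySem.Dict.mk
                  [("excellent_90_100", e), ("good_80_89", g), ("acceptable_70_79", a), ("poor_60_69", p + 1), ("failing_below_60", f), ("processing_failed", pf)] := by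
                simp [aStep, hA1, PySem.Dict.modify, PySem.Dict.insert, PySem.Dict.getD, PySem.Dict.get?, PySem.Dict.contains,
                      show (60:Int) ≤ pvGetInt r "overall_compliance" by omega,
                      show ¬ (70:Int) ≤ pvGetInt r "overall_compliance" by omega,
                      show ¬ (80:Int) ≤ pvGetInt r "overall_compliance" by omega,
                      show ¬ (90:Int) ≤ pvGetInt r "overall_compliance" by omega]
              have hd60 : decide (pvScore r < 60) = false := by simp [pvScore]; omega
              have hd70 : decide (pvScore r < 70) = true := by simp [pvScore]; omega
              have hd80 : decide (pvScore r < 80) = true := by simp [pvScore]; omega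
              have hd90 : decide (pvScore r < 90) = true := by simp [pvScore]; omega
              rw [hA, ih]
              simp [List.countP_cons, hOk, hd60, hd70, hd80, hd90]
              omega
            · · have hA : aStep (PySem.Dict.mk
                    [("excellent_90_100", e), ("good_80_89", g), ("acceptable_70_79", a), ("poor_60_69", p), ("failing_below_60", f), ("processing_failed", pf)]) r
                    = PySem.Dict.mk
                    [("excellent_90_100", e), ("good_80_89", g), ("acceptable_70_79", a), ("poor_60_69", p), ("failing_below_60", f + 1), ("processing_failed", pf)] := by
                  simp [aStep, hA1, PySem.Dict.modify, PySem.Dict.insert, PySem.Dict.getD, PySem.Dict.get?, PySem.Dict.contains,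
                        show ¬ (60:Int) ≤ pvGetInt r "overall_compliance" by omega,
                        show ¬ (70:Int) ≤ pvGetInt r "overall_compliance" by omega,
                        show ¬ (80:Int) ≤ pvGetInt r "overall_compliance" by omega,
                        show ¬ (90:Int) ≤ pvGetInt r "overall_compliance" by omega]
                have hd60 : decide (pvScore r < 60) = true := by simp [pvScore]; omega
                have hd70 : decide (pvScore r < 70) = true := by simp [pvScore]; omega
                have hd80 : decide (pvScore r < 80) = true := by simp [pvScore]; omega
                have hd90 : decide (pvScore r < 90) = true := by simp [pvScore]; omega
                rw [hA, ih]
                simp [List.countP_cons, hOk, hd60, hd70, hd80, hd90]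
                omega

-- B's output rendered as the same counts
theorem alt_eq (l : List (List (String × Int))) :
    analyze_compliance_breakdown_py_alt l
    = [("excellent_90_100", (l.countP (fun r => pvOk r && !(decide (pvScore r < 90))) : Int)),
       ("good_80_89", (l.countP (fun r => pvOk r && decide (pvScore r < 90) && !(decide (pvScore r < 80))) : Int)),
       ("acceptable_70_79", (l.countP (fun r => pvOk r && decide (pvScore r < 80) && !(decide (pvScore r < 70))) : Int)),
       ("poor_60_69", (l.countP (fun r => pvOk r && decide (pvScore r < 70) && !(decide (pvScore r < 60))) : Int)),
       ("failing_below_60", (l.countP (fun r => pvOk r && decide (pvScore r < 60)) : Int)),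
       ("processing_failed", (l.countP (fun r => !(pvOk r)) : Int))] := by
  have hpw : (scoresOf l).Pairwise (· ≤ ·) :=
    PySem.List.sorted_pairwise ((l.filter pvOk).map pvScore) (fun x => x)
  have hcnt : ∀ t : Int, firstAtLeast (scoresOf l) t 0 (scoresOf l).length
      = l.countP (fun r => pvOk r && decide (pvScore r < t)) := by
    intro t
    rw [firstAtLeast_eq (scoresOf l) t hpw (scoresOf l).length 0 (scoresOf l).length
      (by omega) (by omega) le_rfl (by intro j hj hjk; omega) (by intro j hj hjk; omega)]
    show (PySem.List.sorted ((l.filter pvOk).map pvScore) (fun x => x) false).countP _ = _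
    rw [List.Perm.countP_eq _ (PySem.List.sorted_perm _ _ _), List.countP_map, List.countP_filter]
    apply List.countP_congr
    intro a _
    cases h : pvOk a <;> simp [h, Function.comp]
  have hlen : (scoresOf l).length = l.countP pvOk := by
    simp [scoresOf, PySem.List.length_sorted, ← List.countP_eq_length_filter]
  have hN : l.length = l.countP pvOk + l.countP (fun r => !(pvOk r)) := by
    rw [List.length_eq_countP_add_countP pvOk]
    congr 1
    apply List.countP_congr
    intro a _
    cases h : pvOk a <;> simp [h]
  have hs90 : l.countP pvOk = l.countP (fun r => pvOk r && decide (pvScore r < 90))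
      + l.countP (fun r => pvOk r && !(decide (pvScore r < 90))) := by
    rw [countP_subsume pvOk (fun r => pvOk r && decide (pvScore r < 90))
      (by intro a ha; exact ((Bool.and_eq_true _ _).mp ha).1) l]
    congr 1
    apply List.countP_congr
    intro a _
    cases h : pvOk a <;> simp [h]
  have hs80 : l.countP (fun r => pvOk r && decide (pvScore r < 90))
      = l.countP (fun r => pvOk r && decide (pvScore r < 80))
      + l.countP (fun r => pvOk r && decide (pvScore r < 90) && !(decide (pvScore r < 80))) := by
    rw [countP_subsume (fun r => pvOk r && decide (pvScore r < 90))
      (fun r => pvOk r && decide (pvScore r < 80))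
      (by intro a ha; simp at ha ⊢; exact ⟨ha.1, by omega⟩) l]
    congr 1
    apply List.countP_congr
    intro a _
    cases h : pvOk a <;> simp [h, Bool.and_assoc]
  have hs70 : l.countP (fun r => pvOk r && decide (pvScore r < 80))
      = l.countP (fun r => pvOk r && decide (pvScore r < 70))
      + l.countP (fun r => pvOk r && decide (pvScore r < 80) && !(decide (pvScore r < 70))) := by
    rw [countP_subsume (fun r => pvOk r && decide (pvScore r < 80))
      (fun r => pvOk r && decide (pvScore r < 70))
      (by intro a ha; simp at ha ⊢; exact ⟨ha.1, by omega⟩) l]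
    congr 1
    apply List.countP_congr
    intro a _
    cases h : pvOk a <;> simp [h, Bool.and_assoc]
  have hs60 : l.countP (fun r => pvOk r && decide (pvScore r < 70))
      = l.countP (fun r => pvOk r && decide (pvScore r < 60))
      + l.countP (fun r => pvOk r && decide (pvScore r < 70) && !(decide (pvScore r < 60))) := by
    rw [countP_subsume (fun r => pvOk r && decide (pvScore r < 70))
      (fun r => pvOk r && decide (pvScore r < 60))
      (by intro a ha; simp at ha ⊢; exact ⟨ha.1, by omega⟩) l]
    congr 1
    apply List.countP_congr
    intro a _
    cases h : pvOk a <;> simp [h, Bool.and_assoc]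
  simp only [analyze_compliance_breakdown_py_alt]
  rw [hcnt 60, hcnt 70, hcnt 80, hcnt 90, hlen]
  simp only [List.cons.injEq, Prod.mk.injEq, true_and, and_true]
  and_intros <;> omega

-- ===== VERDICT =====
theorem analyze_compliance_breakdown_py_spec : Claim_equal_analyze_compliance_breakdown_py := by
  intro l _
  show analyze_compliance_breakdown_py l = analyze_compliance_breakdown_py_alt l
  have h : analyze_compliance_breakdown_py l
      = (l.foldl aStep (PySem.Dict.mk
        [("excellent_90_100", 0), ("good_80_89", 0), ("acceptable_70_79", 0),
         ("poor_60_69", 0), ("failing_below_60", 0), ("processing_failed", 0)])).items := rfl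
  rw [h, foldA, alt_eq]
  simp
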